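-- pv_equiv track=rewrite | github.com/Bob1883/dr.mario | Components/checkFourInRow.py | checkFourInRow
-- ===== SOURCE A (Python) =====
-- def removeDups(array:list) -> list:
--     newArray = []
--     for subList in array:
--         if subList not in newArray:
--             newArray.append(subList)
--     return newArray
--
-- def inverseMap(gameMap:list) -> list:
--     newMap = []
--
--     for i in range(len(gameMap)):
--         mapSlice = []
--         for n in range(len(gameMap[0])):
--             mapSlice.append(gameMap[n][i])
--
--         newMap.append(mapSlice)
--
--     return newMap
--
-- def checkToRemove(mapSlice:list) -> list:
--     colors = ["b", "g", "r", "y"]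
--     toRemove = []
--
--     for height in range(len(mapSlice)):
--         for color in colors:
--             count = 0
--             for width in range(len(mapSlice[0])):
--                 if color in mapSlice[height][width] and "a" not in mapSlice[height][width]:
--                     count += 1
--                 else:
--                     count = 0
--
--                 if count >= 4:
--                     for i in range(4):
--                         toRemove.append([height, width-i])
--
--     return toRemove
--
-- def checkFourInRow(gameMap:list, score:int) -> tuple:
--     toRemove = []
--
--     inverse = inverseMap(gameMap)
--     vertical = checkToRemove(inverse)
--     horizontal = checkToRemove(gameMap)
--
--     for n in range(len(vertical)):
--         vertical[n] = [vertical[n][1], vertical[n][0]]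
--
--     toRemove.extend(vertical)
--     toRemove.extend(horizontal)
--
--     toRemove = removeDups(toRemove)
--
--     for cords in toRemove:
--         gameMap[cords[0]][cords[1]] = "*"
--         score += 1
--
--     return gameMap, score
-- ===== SOURCE B (Python) =====
-- def checkFourInRow(gameMap, score):
--     rows = len(gameMap)
--     cols = len(gameMap[0]) if gameMap else 0
--     colors = ["b", "g", "r", "y"]
--
--     def hit(r, c, color):
--         cell = gameMap[r][c]
--         return color in cell and "a" not in cell
--
--     cleared = []
--     for r in range(rows):
--         for c in range(cols):
--             horiz = any(
--                 all(hit(r, s + i, color) for i in range(4))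
--                 for color in colors
--                 for s in range(max(0, c - 3), min(c, cols - 4) + 1)
--             )
--             vert = any(
--                 all(hit(s + i, c, color) for i in range(4))
--                 for color in colors
--                 for s in range(max(0, r - 3), min(r, rows - 4) + 1)
--             )
--             if horiz or vert:
--                 cleared.append((r, c))
--
--     for (r, c) in cleared:
--         gameMap[r][c] = "*"
--
--     return gameMap, score + len(cleared)
-- ===== Notes on version B (the rewrite author's own statement) =====
-- stated objective: alternative
-- what changed: B decides for each cell directly whether it lies inside some 4-window of one color (horizontal or vertical), collecting each cleared cell exactly once, instead of A's transpose helper plus a stateful sliding counter that appends overlapping 4-blocks and then deduplicates them.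
import Mathlib
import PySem

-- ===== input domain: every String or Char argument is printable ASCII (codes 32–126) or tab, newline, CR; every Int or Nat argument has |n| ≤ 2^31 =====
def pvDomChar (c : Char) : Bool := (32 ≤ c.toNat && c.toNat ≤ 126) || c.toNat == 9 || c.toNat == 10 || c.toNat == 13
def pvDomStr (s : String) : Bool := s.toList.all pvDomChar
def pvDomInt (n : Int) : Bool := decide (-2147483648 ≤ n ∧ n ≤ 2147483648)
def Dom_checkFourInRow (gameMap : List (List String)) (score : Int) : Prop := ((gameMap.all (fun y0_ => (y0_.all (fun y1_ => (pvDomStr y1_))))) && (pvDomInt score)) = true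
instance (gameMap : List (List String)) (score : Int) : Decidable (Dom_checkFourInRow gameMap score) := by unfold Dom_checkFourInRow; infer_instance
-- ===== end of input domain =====

-- B replaces A's transpose helper + stateful sliding counter + overlapping-block dedup by a direct
-- per-cell test "does this cell lie in some 4-window of one color" collected once into a set (objective: alternative).
-- A mutates gameMap in place; the equivalence proved here is about the RETURN value (B performs the same mutation in Python).

-- ===== PORT A =====
def removeDupsA (array : List (List Int)) : List (List Int) :=
  array.foldl (fun newArray subList => if subList ∈ newArray then newArray else newArray ++ [subList]) []

def inverseMapA (gameMap : List (List String)) : List (List String) :=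
  (PySem.List.pyRange 0 (gameMap.length : Int) 1).foldl
    (fun newMap i =>
      newMap ++ [(PySem.List.pyRange 0 ((PySem.List.pyGetD gameMap 0 []).length : Int) 1).foldl
        (fun mapSlice n => mapSlice ++ [PySem.List.pyGetD (PySem.List.pyGetD gameMap n []) i ""]) []])
    []

def checkToRemoveA (mapSlice : List (List String)) : List (List Int) :=
  (PySem.List.pyRange 0 (mapSlice.length : Int) 1).foldl
    (fun toRemove height =>
      (["b", "g", "r", "y"]).foldl
        (fun toRemove color =>
          ((PySem.List.pyRange 0 ((PySem.List.pyGetD mapSlice 0 []).length : Int) 1).foldl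
            (fun (st : Int × List (List Int)) width =>
              let cell := PySem.List.pyGetD (PySem.List.pyGetD mapSlice height []) width ""
              let count : Int := if PySem.Str.isIn color cell && !(PySem.Str.isIn "a" cell) then st.1 + 1 else 0
              (count,
               if 4 ≤ count then
                 (PySem.List.pyRange 0 4 1).foldl (fun tr i => tr ++ [[height, width - i]]) st.2
               else st.2))
            (0, toRemove)).2)
        toRemove)
    []

def checkFourInRow (gameMap : List (List String)) (score : Int) : List (List String) × Int :=
  let inverse := inverseMapA gameMap
  let vertical := checkToRemoveA inverse
  let horizontal := checkToRemoveA gameMap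
  -- 'for n in range(len(vertical)): vertical[n] = [vertical[n][1], vertical[n][0]]' : each slot is
  -- rewritten once from its own old value, so the in-place index loop is ported as a map over the list
  let vertical := vertical.map (fun cord =>
    [PySem.List.pyGetD cord 1 0, PySem.List.pyGetD cord 0 0])
  let toRemove := ([] : List (List Int)) ++ vertical ++ horizontal
  let toRemove := removeDupsA toRemove
  toRemove.foldl
    (fun (st : List (List String) × Int) cords =>
      (PySem.List.pySetD st.1 (PySem.List.pyGetD cords 0 0)
         (PySem.List.pySetD (PySem.List.pyGetD st.1 (PySem.List.pyGetD cords 0 0) []) (PySem.List.pyGetD cords 1 0) "*"),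
       st.2 + 1))
    (gameMap, score)

-- ===== PORT B =====
def checkFourInRow_alt (gameMap : List (List String)) (score : Int) : List (List String) × Int :=
  let rows : Int := gameMap.length
  let cols : Int := if gameMap = [] then 0 else ((PySem.List.pyGetD gameMap 0 []).length : Int)
  let colors := ["b", "g", "r", "y"]
  let hit : Int → Int → String → Bool := fun r c color =>
    let cell := PySem.List.pyGetD (PySem.List.pyGetD gameMap r []) c ""
    PySem.Str.isIn color cell && !(PySem.Str.isIn "a" cell)
  let cleared : List (Int × Int) :=
    (PySem.List.pyRange 0 rows 1).foldl
      (fun cleared r =>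
        (PySem.List.pyRange 0 cols 1).foldl
          (fun cleared c =>
            let horiz := colors.any (fun color =>
              (PySem.List.pyRange (max 0 (c - 3)) (min c (cols - 4) + 1) 1).any (fun s =>
                (PySem.List.pyRange 0 4 1).all (fun i => hit r (s + i) color)))
            let vert := colors.any (fun color =>
              (PySem.List.pyRange (max 0 (r - 3)) (min r (rows - 4) + 1) 1).any (fun s =>
                (PySem.List.pyRange 0 4 1).all (fun i => hit (s + i) c color)))
            if horiz || vert then cleared ++ [(r, c)] else cleared)
          cleared)
      []
  let gameMap := cleared.foldl
    (fun g p => PySem.List.pySetD g p.1 (PySem.List.pySetD (PySem.List.pyGetD g p.1 []) p.2 "*")) gameMap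
  (gameMap, score + cleared.length)

-- ===== PRECONDITION & SPEC =====
-- Pre_ excludes exactly the inputs on which A raises IndexError: grids whose first row is
-- non-empty but not of the grid's height, or with some row shorter than the height
-- (A's transpose helper and width loops index out of range there).
def Pre_checkFourInRow (gameMap : List (List String)) (score : Int) : Prop :=
  (gameMap.headD []).length = 0 ∨
    ((gameMap.headD []).length = gameMap.length ∧ ∀ row ∈ gameMap, gameMap.length ≤ row.length)
instance (gameMap : List (List String)) (score : Int) : Decidable (Pre_checkFourInRow gameMap score) := by
  unfold Pre_checkFourInRow; infer_instance

def pvWitness_checkFourInRow : List (List String) × Int :=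
  ([["r", "r"], ["b", "ga"]], 3)

def Spec_checkFourInRow (gameMap : List (List String)) (score : Int) (out : List (List String) × Int) : Prop := out = checkFourInRow_alt gameMap score
instance (gameMap : List (List String)) (score : Int) (out : List (List String) × Int) : Decidable (Spec_checkFourInRow gameMap score out) := by unfold Spec_checkFourInRow; infer_instance

-- ===== CLAIM (what is proved, stated in full; the proofs are below) =====
def Claim_equal_checkFourInRow : Prop := ∀ (gameMap : List (List String)) (score : Int), Dom_checkFourInRow gameMap score → Pre_checkFourInRow gameMap score → Spec_checkFourInRow gameMap score (checkFourInRow gameMap score)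

-- ===== LEMMAS AND PROOFS =====

-- ---- shared vocabulary ----
def colorsL : List String := ["b", "g", "r", "y"]

def hitG (g : List (List String)) (r c : Int) (color : String) : Bool :=
  PySem.Str.isIn color (PySem.List.pyGetD (PySem.List.pyGetD g r []) c "") &&
  !(PySem.Str.isIn "a" (PySem.List.pyGetD (PySem.List.pyGetD g r []) c ""))

def colsOf (g : List (List String)) : Nat := (PySem.List.pyGetD g 0 []).length

-- run length of the current all-hit suffix of row h after scanning k cells
def runlenF (g : List (List String)) (h : Int) (color : String) : Nat → Nat
  | 0 => 0
  | k + 1 => if hitG g h (k : Int) color then runlenF g h color k + 1 else 0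

-- what A's counter loop appends for row h / one color over the first k cells
def blockA (g : List (List String)) (h : Int) (color : String) : Nat → List (List Int)
  | 0 => []
  | k + 1 => blockA g h color k ++
      (if 4 ≤ runlenF g h color (k + 1) then
        [[h, (k : Int)], [h, (k : Int) - 1], [h, (k : Int) - 2], [h, (k : Int) - 3]] else [])

-- A's inner width loop, one step
def stepA (g : List (List String)) (h : Int) (color : String)
    (st : Int × List (List Int)) (w : Int) : Int × List (List Int) :=
  let cell := PySem.List.pyGetD (PySem.List.pyGetD g h []) w ""
  let count : Int := if PySem.Str.isIn color cell && !(PySem.Str.isIn "a" cell) then st.1 + 1 else 0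
  (count,
   if 4 ≤ count then
     (PySem.List.pyRange 0 4 1).foldl (fun tr i => tr ++ [[h, w - i]]) st.2
   else st.2)

-- B's per-cell predicate (exactly the port's horiz || vert)
def PB (g : List (List String)) (r c : Int) : Bool :=
  (colorsL.any (fun color =>
    (PySem.List.pyRange (max 0 (c - 3)) (min c (((colsOf g : Int)) - 4) + 1) 1).any (fun s =>
      (PySem.List.pyRange 0 4 1).all (fun i => hitG g r (s + i) color)))) ||
  (colorsL.any (fun color =>
    (PySem.List.pyRange (max 0 (r - 3)) (min r (((g.length : Int)) - 4) + 1) 1).any (fun s =>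
      (PySem.List.pyRange 0 4 1).all (fun i => hitG g (s + i) c color))))

-- marking one coordinate
def markCell (st : List (List String)) (p : Int × Int) : List (List String) :=
  PySem.List.pySetD st p.1 (PySem.List.pySetD (PySem.List.pyGetD st p.1 []) p.2 "*")

def toPair (cords : List Int) : Int × Int :=
  (PySem.List.pyGetD cords 0 0, PySem.List.pyGetD cords 1 0)

-- A's deduplicated coordinate list
def TRlist (g : List (List String)) : List (List Int) :=
  PySem.Set.ofList
    (((checkToRemoveA (inverseMapA g)).map
        (fun cord => [PySem.List.pyGetD cord 1 0, PySem.List.pyGetD cord 0 0])) ++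
      checkToRemoveA g)

-- B's coordinate list in flatMap form
def clearedD (g : List (List String)) : List (Int × Int) :=
  (List.range g.length).flatMap (fun rn : Nat =>
    ((List.range (colsOf g)).filter (fun cn : Nat => PB g (rn : Int) (cn : Int))).map
      (fun cn : Nat => ((rn : Int), (cn : Int))))

-- the mark predicates (horizontal / vertical window containing the cell)
def MarkHP (g : List (List String)) (C rn cn : Nat) : Prop :=
  ∃ color ∈ colorsL, ∃ s : Nat, s + 3 < C ∧ s ≤ cn ∧ cn ≤ s + 3 ∧
    ∀ i : Nat, i < 4 → hitG g (rn : Int) ((s + i : Nat) : Int) color = true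

def MarkVP (g : List (List String)) (R rn cn : Nat) : Prop :=
  ∃ color ∈ colorsL, ∃ s : Nat, s + 3 < R ∧ s ≤ rn ∧ rn ≤ s + 3 ∧
    ∀ i : Nat, i < 4 → hitG g ((s + i : Nat) : Int) (cn : Int) color = true

-- ---- small facts ----
lemma pyRangeNat (n : Nat) :
    PySem.List.pyRange 0 (n : Int) 1 = (List.range n).map (fun k : Nat => (k : Int)) := by
  rw [PySem.List.pyRange_one]
  norm_num

lemma pyRange4 : PySem.List.pyRange 0 4 1 = ([0, 1, 2, 3] : List Int) := by decide

lemma block4 (h w : Int) (acc : List (List Int)) :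
    (PySem.List.pyRange 0 4 1).foldl (fun tr i => tr ++ [[h, w - i]]) acc
      = acc ++ [[h, w], [h, w - 1], [h, w - 2], [h, w - 3]] := by
  rw [show PySem.List.pyRange 0 4 1 = ([0,1,2,3] : List Int) from by decide]
  simp [List.foldl]

-- ---- A side: the inner counter loop ----
lemma stepA_eval (g : List (List String)) (h : Int) (color : String) (c : Int)
    (t : List (List Int)) (w : Int) :
    stepA g h color (c, t) w =
      (if hitG g h w color then c + 1 else 0,
       if (4:Int) ≤ (if hitG g h w color then c + 1 else 0) then
         t ++ [[h, w], [h, w - 1], [h, w - 2], [h, w - 3]] else t) := by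
  simp only [stepA, hitG, block4]
  rfl


lemma inner_spec (g : List (List String)) (h : Int) (color : String)
    (acc : List (List Int)) (k : Nat) :
    (List.range k).foldl (fun st (w : Nat) => stepA g h color st (w : Int)) ((0 : Int), acc)
      = ((runlenF g h color k : Int), acc ++ blockA g h color k) := by
  induction k with
  | zero => simp [runlenF, blockA]
  | succ k ih =>
    rw [List.range_succ, List.foldl_append, ih]
    simp only [List.foldl_cons, List.foldl_nil, stepA_eval]
    have h1 : (if hitG g h (k:Int) color then ((runlenF g h color k : Nat) : Int) + 1 else 0)
        = ((runlenF g h color (k+1) : Nat) : Int) := by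
      rw [runlenF]; by_cases hh : hitG g h (k:Int) color <;> simp [hh]
    rw [h1]
    have h2 : ((4:Int) ≤ ((runlenF g h color (k+1) : Nat) : Int)) ↔ 4 ≤ runlenF g h color (k+1) := by
      exact_mod_cast Iff.rfl
    rw [blockA]
    by_cases h4 : 4 ≤ runlenF g h color (k+1)
    · rw [if_pos (h2.mpr h4), if_pos h4, List.append_assoc]
    · rw [if_neg (fun hx => h4 (h2.mp hx)), if_neg h4, List.append_nil]


lemma runlen_le_iff (g : List (List String)) (h : Int) (color : String) :
    ∀ (k j : Nat), j ≤ runlenF g h color k ↔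
      j ≤ k ∧ ∀ i : Nat, i < j → hitG g h ((k - 1 - i : Nat) : Int) color = true := by
  intro k
  induction k with
  | zero => intro j; cases j <;> simp [runlenF]
  | succ k ih =>
    intro j
    cases j with
    | zero => simp [runlenF]
    | succ j =>
      rw [runlenF]
      by_cases hh : hitG g h (k : Int) color
      · rw [if_pos hh]
        constructor
        · intro hle
          have := (ih j).mp (by omega)
          refine ⟨by omega, ?_⟩
          intro i hi
          cases i with
          | zero => simpa using hh
          | succ i =>
            have := this.2 i (by omega)
            have he : k + 1 - 1 - (i+1) = k - 1 - i := by omega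
            rw [he]; exact this
        · rintro ⟨hk, hall⟩
          have : j ≤ runlenF g h color k := by
            apply (ih j).mpr
            constructor
            · omega
            · intro i hi
              have := hall (i+1) (by omega)
              have he : k + 1 - 1 - (i+1) = k - 1 - i := by omega
              rwa [he] at this
          omega
      · rw [if_neg hh]
        constructor
        · omega
        · rintro ⟨hk, hall⟩
          exfalso
          have := hall 0 (by omega)
          simp at this
          exact hh this


lemma win4 (g : List (List String)) (h : Int) (color : String) (k : Nat) :
    4 ≤ runlenF g h color (k+1) ↔
      3 ≤ k ∧ ∀ i : Nat, i < 4 → hitG g h ((k - 3 + i : Nat) : Int) color = true := by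
  rw [runlen_le_iff]
  constructor
  · rintro ⟨hk, hall⟩
    refine ⟨by omega, ?_⟩
    intro i hi
    have := hall (3 - i) (by omega)
    have he : k + 1 - 1 - (3 - i) = k - 3 + i := by omega
    rwa [he] at this
  · rintro ⟨hk, hall⟩
    refine ⟨by omega, ?_⟩
    intro i hi
    have := hall (3 - i) (by omega)
    have he : k - 3 + (3 - i) = k + 1 - 1 - i := by omega
    rwa [he] at this


lemma mem_blockA (g : List (List String)) (h : Int) (color : String) :
    ∀ (k : Nat) (x : List Int), x ∈ blockA g h color k ↔
      ∃ s : Nat, s + 3 < k ∧ (∀ i : Nat, i < 4 → hitG g h ((s + i : Nat) : Int) color = true) ∧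
        ∃ j : Nat, j < 4 ∧ x = [h, ((s + j : Nat) : Int)] := by
  intro k
  induction k with
  | zero => intro x; simp [blockA]
  | succ k ih =>
    intro x
    rw [blockA, List.mem_append, ih]
    by_cases h4 : 4 ≤ runlenF g h color (k+1)
    · obtain ⟨hk3, hwin⟩ := (win4 g h color k).mp h4
      rw [if_pos h4]
      have hcast : ∀ m : Nat, m ≤ 3 → ((k - 3 + (3 - m) : Nat) : Int) = (k : Int) - m := by
        intro m hm; omega
      constructor
      · rintro (⟨s, hs, hw, j, hj, hx⟩ | hmem)
        · exact ⟨s, by omega, hw, j, hj, hx⟩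
        · refine ⟨k - 3, by omega, hwin, ?_⟩
          simp only [List.mem_cons, List.not_mem_nil, or_false] at hmem
          rcases hmem with hx | hx | hx | hx
          · exact ⟨3, by omega, by rw [hx]; congr 2; omega⟩
          · exact ⟨2, by omega, by rw [hx]; congr 2; omega⟩
          · exact ⟨1, by omega, by rw [hx]; congr 2; omega⟩
          · exact ⟨0, by omega, by rw [hx]; congr 2; omega⟩
      · rintro ⟨s, hs, hw, j, hj, hx⟩
        by_cases hsk : s + 3 < k
        · exact Or.inl ⟨s, hsk, hw, j, hj, hx⟩
        · right
          have hse : s = k - 3 := by omega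
          have : ((s + j : Nat) : Int) = (k : Int) - (3 - j : Nat) := by omega
          rw [hx, this]
          interval_cases j <;> norm_num [List.mem_cons]
    · rw [if_neg h4]
      simp only [List.not_mem_nil, or_false]
      constructor
      · rintro ⟨s, hs, hw, j, hj, hx⟩; exact ⟨s, by omega, hw, j, hj, hx⟩
      · rintro ⟨s, hs, hw, j, hj, hx⟩
        by_cases hsk : s + 3 < k
        · exact ⟨s, hsk, hw, j, hj, hx⟩
        · exfalso
          apply h4
          rw [win4]
          refine ⟨by omega, ?_⟩
          have hse : s = k - 3 := by omega
          intro i hi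
          have := hw i hi
          rwa [show k - 3 + i = s + i from by omega]


-- ---- A side: checkToRemoveA in closed form ----
lemma ctr_eq (m : List (List String)) :
    checkToRemoveA m = (List.range m.length).flatMap (fun h : Nat =>
      colorsL.flatMap (fun color => blockA m (h : Int) color (colsOf m))) := by
  unfold checkToRemoveA
  simp only [pyRangeNat, List.foldl_map]
  show List.foldl
      (fun toRemove (k : Nat) =>
        colorsL.foldl
          (fun tr color =>
            (List.foldl (fun st (w : Nat) => stepA m (k : Int) color st (w : Int)) ((0:Int), tr)
              (List.range (PySem.List.pyGetD m 0 []).length)).2)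
          toRemove)
      [] (List.range m.length) = _
  simp only [inner_spec]
  simp only [PySem.List.foldl_append_eq_flatMap]
  simp only [List.nil_append, colsOf]


lemma mem_ctr (m : List (List String)) (x : List Int) :
    x ∈ checkToRemoveA m ↔
      ∃ h : Nat, h < m.length ∧ ∃ color ∈ colorsL, ∃ s : Nat, s + 3 < colsOf m ∧
        (∀ i : Nat, i < 4 → hitG m (h : Int) ((s + i : Nat) : Int) color = true) ∧
        ∃ j : Nat, j < 4 ∧ x = [(h : Int), ((s + j : Nat) : Int)] := by
  rw [ctr_eq]
  simp only [List.mem_flatMap, List.mem_range, mem_blockA]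

-- ---- A side: the transpose ----
lemma inverse_eq (g : List (List String)) :
    inverseMapA g = (List.range g.length).map (fun i : Nat =>
      (List.range (colsOf g)).map (fun n : Nat =>
        PySem.List.pyGetD (PySem.List.pyGetD g (n : Int) []) (i : Int) "")) := by
  unfold inverseMapA
  simp only [pyRangeNat, List.foldl_map]
  simp only [PySem.List.foldl_append_singleton_eq_map, List.nil_append, colsOf]

lemma length_inverse (g : List (List String)) : (inverseMapA g).length = g.length := by
  rw [inverse_eq]; simp

lemma cols_inverse (g : List (List String)) (hN : 0 < g.length) :
    colsOf (inverseMapA g) = colsOf g := by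
  rw [colsOf, inverse_eq, PySem.List.pyGetD_zero, List.getD_eq_getElem?_getD]
  simp [hN, colsOf]

lemma hit_inverse (g : List (List String)) (hn wn : Nat) (color : String)
    (hh : hn < g.length) (hw : wn < colsOf g) :
    hitG (inverseMapA g) (hn : Int) (wn : Int) color = hitG g (wn : Int) (hn : Int) color := by
  have h1 : PySem.List.pyGetD (inverseMapA g) (hn : Int) [] =
      (List.range (colsOf g)).map (fun n : Nat => PySem.List.pyGetD (PySem.List.pyGetD g (n : Int) []) (hn : Int) "") := by
    rw [inverse_eq, PySem.List.pyGetD_natCast, PySem.List.getD_map_range _ _ _ _ hh]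
  rw [hitG, hitG, h1, PySem.List.pyGetD_natCast, PySem.List.getD_map_range _ _ _ _ hw]

-- ---- A side: dedup is a PySem.Set ----
lemma removeDups_eq (l : List (List Int)) : removeDupsA l = PySem.Set.ofList l := by
  rw [removeDupsA, PySem.Set.ofList_eq_foldl]
  congr 1; funext s x
  rw [PySem.Set.add_eq_ite]

lemma swap_pair (a b : Int) :
    [PySem.List.pyGetD ([a, b] : List Int) 1 0, PySem.List.pyGetD ([a, b] : List Int) 0 0] = [b, a] := by
  simp [pysem]

-- ---- A side: membership of the final list ----
lemma mem_TRlist (g : List (List String)) (hC : colsOf g = g.length) (x : List Int) :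
    x ∈ TRlist g ↔ ∃ rn : Nat, rn < g.length ∧ ∃ cn : Nat, cn < g.length ∧
      x = [(rn : Int), (cn : Int)] ∧
      (MarkHP g g.length rn cn ∨ MarkVP g g.length rn cn) := by
  have hLinv := length_inverse g
  unfold TRlist
  rw [PySem.Set.mem_ofList, List.mem_append, List.mem_map]
  constructor
  · rintro (⟨cord, hcord, rfl⟩ | hmem)
    · -- vertical piece
      rw [mem_ctr] at hcord
      obtain ⟨h, hh, color, hcol, s1, hs1, hw, j, hj, rfl⟩ := hcord
      rw [hLinv] at hh
      have hN : 0 < g.length := by omega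
      rw [cols_inverse g hN, hC] at hs1
      rw [swap_pair]
      refine ⟨s1 + j, by omega, h, hh, by norm_num, Or.inr ?_⟩
      refine ⟨color, hcol, s1, by omega, by omega, by omega, ?_⟩
      intro i hi
      have := hw i hi
      rwa [hit_inverse g h (s1 + i) color hh (by omega)] at this
    · -- horizontal piece
      rw [mem_ctr] at hmem
      obtain ⟨h, hh, color, hcol, s1, hs1, hw, j, hj, rfl⟩ := hmem
      rw [hC] at hs1
      exact ⟨h, hh, s1 + j, by omega, rfl,
        Or.inl ⟨color, hcol, s1, by omega, by omega, by omega, hw⟩⟩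
  · rintro ⟨rn, hrn, cn, hcn, rfl, hmark | hmark⟩
    · -- horizontal
      right
      obtain ⟨color, hcol, s1, hsC, hsc, hcs, hw⟩ := hmark
      rw [mem_ctr]
      refine ⟨rn, hrn, color, hcol, s1, by omega, hw, cn - s1, by omega, ?_⟩
      congr 2
      omega
    · -- vertical
      left
      obtain ⟨color, hcol, s1, hsR, hsr, hrs, hw⟩ := hmark
      have hN : 0 < g.length := by omega
      refine ⟨[(cn : Int), ((s1 + (rn - s1) : Nat) : Int)], ?_, ?_⟩
      · rw [mem_ctr]
        refine ⟨cn, by omega, color, hcol, s1, ?_, ?_, rn - s1, by omega, rfl⟩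
        · rw [cols_inverse g hN, hC]; omega
        · intro i hi
          rw [hit_inverse g cn (s1 + i) color (by omega) (by omega)]
          exact hw i hi
      · rw [swap_pair]
        congr 2
        omega

lemma nodup_TRlist (g : List (List String)) : (TRlist g).Nodup :=
  PySem.Set.nodup_ofList _

-- ---- A assembled ----
lemma A_eq (g : List (List String)) (s : Int) :
    checkFourInRow g s =
      (((TRlist g).map toPair).foldl markCell g, s + ((TRlist g).length : Int)) := by
  unfold checkFourInRow TRlist
  simp only [removeDups_eq, List.nil_append]
  rw [PySem.List.foldl_prod_mk
      (f := fun g1 cords => PySem.List.pySetD g1 (PySem.List.pyGetD cords 0 0)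
        (PySem.List.pySetD (PySem.List.pyGetD g1 (PySem.List.pyGetD cords 0 0) [])
          (PySem.List.pyGetD cords 1 0) "*"))
      (g := fun sc (_ : List Int) => sc + (1 : Int))]
  rw [List.foldl_map]
  rw [PySem.List.foldl_add (g := fun (_ : List Int) => (1 : Int))]
  simp [markCell, toPair]

-- ---- B side ----
lemma B_eq (g : List (List String)) (s : Int) :
    checkFourInRow_alt g s =
      ((clearedD g).foldl markCell g, s + ((clearedD g).length : Int)) := by
  unfold checkFourInRow_alt clearedD
  have hcols : (if g = [] then (0 : Int) else ((PySem.List.pyGetD g 0 []).length : Int))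
      = ((colsOf g : Nat) : Int) := by
    split_ifs with h
    · subst h; simp [colsOf, PySem.List.pyGetD_zero]
    · rfl
  simp only [hcols, pyRangeNat, List.foldl_map]
  show ((List.foldl (fun cl (rn : Nat) =>
          List.foldl (fun cl2 (cn : Nat) =>
              if PB g (rn : Int) (cn : Int) then cl2 ++ [((rn : Int), (cn : Int))] else cl2)
            cl (List.range (colsOf g)))
        [] (List.range g.length)).foldl markCell g,
      s + ((List.foldl (fun cl (rn : Nat) =>
          List.foldl (fun cl2 (cn : Nat) =>
              if PB g (rn : Int) (cn : Int) then cl2 ++ [((rn : Int), (cn : Int))] else cl2)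
            cl (List.range (colsOf g)))
        [] (List.range g.length)).length : Int)) = _
  simp only [PySem.List.foldl_append_if, PySem.List.foldl_append_eq_flatMap, List.nil_append, colsOf]

lemma PB_iff (g : List (List String)) (rn cn : Nat) :
    PB g (rn : Int) (cn : Int) = true ↔
      MarkHP g (colsOf g) rn cn ∨ MarkVP g g.length rn cn := by
  unfold PB MarkHP MarkVP
  rw [Bool.or_eq_true]
  simp only [List.any_eq_true, PySem.List.mem_pyRange_one, pyRange4,
    List.all_cons, List.all_nil, Bool.and_eq_true, and_true]
  constructor
  · rintro (⟨color, hcol, s, ⟨hs1, hs2⟩, h0, h1, h2, h3⟩ | ⟨color, hcol, s, ⟨hs1, hs2⟩, h0, h1, h2, h3⟩)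
    · left
      refine ⟨color, hcol, s.toNat, by omega, by omega, by omega, ?_⟩
      intro i hi
      interval_cases i
      · rwa [show ((s.toNat + 0 : Nat) : Int) = s + 0 from by omega]
      · rwa [show ((s.toNat + 1 : Nat) : Int) = s + 1 from by omega]
      · rwa [show ((s.toNat + 2 : Nat) : Int) = s + 2 from by omega]
      · rwa [show ((s.toNat + 3 : Nat) : Int) = s + 3 from by omega]
    · right
      refine ⟨color, hcol, s.toNat, by omega, by omega, by omega, ?_⟩
      intro i hi
      interval_cases i
      · rwa [show ((s.toNat + 0 : Nat) : Int) = s + 0 from by omega]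
      · rwa [show ((s.toNat + 1 : Nat) : Int) = s + 1 from by omega]
      · rwa [show ((s.toNat + 2 : Nat) : Int) = s + 2 from by omega]
      · rwa [show ((s.toNat + 3 : Nat) : Int) = s + 3 from by omega]
  · rintro (⟨color, hcol, s, hsC, hsc, hcs, hw⟩ | ⟨color, hcol, s, hsR, hsr, hrs, hw⟩)
    · left
      refine ⟨color, hcol, (s : Int), ⟨by omega, by omega⟩, ?_, ?_, ?_, ?_⟩
      · have := hw 0 (by omega); rwa [show ((s + 0 : Nat) : Int) = (s : Int) + 0 from by omega] at this
      · have := hw 1 (by omega); rwa [show ((s + 1 : Nat) : Int) = (s : Int) + 1 from by omega] at this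
      · have := hw 2 (by omega); rwa [show ((s + 2 : Nat) : Int) = (s : Int) + 2 from by omega] at this
      · have := hw 3 (by omega); rwa [show ((s + 3 : Nat) : Int) = (s : Int) + 3 from by omega] at this
    · right
      refine ⟨color, hcol, (s : Int), ⟨by omega, by omega⟩, ?_, ?_, ?_, ?_⟩
      · have := hw 0 (by omega); rwa [show ((s + 0 : Nat) : Int) = (s : Int) + 0 from by omega] at this
      · have := hw 1 (by omega); rwa [show ((s + 1 : Nat) : Int) = (s : Int) + 1 from by omega] at this
      · have := hw 2 (by omega); rwa [show ((s + 2 : Nat) : Int) = (s : Int) + 2 from by omega] at this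
      · have := hw 3 (by omega); rwa [show ((s + 3 : Nat) : Int) = (s : Int) + 3 from by omega] at this

lemma mem_clearedD (g : List (List String)) (p : Int × Int) :
    p ∈ clearedD g ↔ ∃ rn : Nat, rn < g.length ∧ ∃ cn : Nat, cn < colsOf g ∧
      p = ((rn : Int), (cn : Int)) ∧ PB g (rn : Int) (cn : Int) = true := by
  unfold clearedD
  simp only [List.mem_flatMap, List.mem_range, List.mem_map, List.mem_filter]
  constructor
  · rintro ⟨rn, hrn, cn, ⟨hcn, hPB⟩, rfl⟩
    exact ⟨rn, hrn, cn, hcn, rfl, hPB⟩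
  · rintro ⟨rn, hrn, cn, hcn, rfl, hPB⟩
    exact ⟨rn, hrn, cn, ⟨hcn, hPB⟩, rfl⟩

lemma nodup_clearedD (g : List (List String)) : (clearedD g).Nodup := by
  unfold clearedD
  rw [List.nodup_flatMap]
  constructor
  · intro rn _
    refine List.Nodup.map_on ?_ ((List.nodup_range).filter _)
    intro x _ y _ hxy
    simp only [Prod.mk.injEq, Int.natCast_inj] at hxy
    exact hxy.2
  · refine List.Pairwise.imp ?_ (List.pairwise_lt_range)
    intro r1 r2 hlt a ha hb
    simp only [List.mem_map, List.mem_filter] at ha hb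
    obtain ⟨c1, _, rfl⟩ := ha
    obtain ⟨c2, _, hab⟩ := hb
    have := congrArg Prod.fst hab
    simp only [Int.natCast_inj] at this
    omega

-- ---- marking fold: permutation invariance ----
lemma setRow_comm (row : List String) (c₁ c₂ : Nat) :
    (row.set c₁ "*").set c₂ "*" = (row.set c₂ "*").set c₁ "*" := by
  by_cases hc : c₁ = c₂
  · subst hc; simp [List.set_set]
  · exact List.set_comm _ _ hc

lemma markCell_comm (z : List (List String)) (p q : Int × Int)
    (hp : 0 ≤ p.1 ∧ 0 ≤ p.2) (hq : 0 ≤ q.1 ∧ 0 ≤ q.2) :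
    markCell (markCell z p) q = markCell (markCell z q) p := by
  obtain ⟨a, c1⟩ := p
  obtain ⟨b, c2⟩ := q
  obtain ⟨ha, hc1⟩ := hp
  obtain ⟨hb, hc2⟩ := hq
  simp only [markCell]
  rw [show a = ((a.toNat : Nat) : Int) from by omega, show b = ((b.toNat : Nat) : Int) from by omega,
      show c1 = ((c1.toNat : Nat) : Int) from by omega, show c2 = ((c2.toNat : Nat) : Int) from by omega]
  generalize a.toNat = A
  generalize b.toNat = B
  generalize c1.toNat = C1
  generalize c2.toNat = C2
  simp only [PySem.List.pySetD_natCast, PySem.List.pyGetD_natCast]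
  simp only [List.getD_eq_getElem?_getD]
  by_cases hab : A = B
  · subst hab
    by_cases hlen : A < z.length
    · rw [List.getElem?_set_self hlen, List.getElem?_set_self hlen]
      simp only [Option.getD_some, List.set_set]
      rw [setRow_comm]
    · have hle : z.length ≤ A := by omega
      simp [List.set_eq_of_length_le, hle]
  · rw [List.getElem?_set_ne hab, List.getElem?_set_ne (Ne.symm hab), List.set_comm _ _ hab]

lemma markfold_perm (l₁ l₂ : List (Int × Int)) (h : l₁.Perm l₂)
    (hpos : ∀ p ∈ l₁, 0 ≤ p.1 ∧ 0 ≤ p.2) (z : List (List String)) :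
    l₁.foldl markCell z = l₂.foldl markCell z := by
  exact List.Perm.foldl_eq' h (fun p hp q hq z => markCell_comm z p q (hpos p hp) (hpos q hq)) z

-- ---- the main theorem ----
lemma toPair_pair (a b : Int) : toPair [a, b] = (a, b) := by
  simp [toPair, pysem]

lemma colsOf_headD (g : List (List String)) : colsOf g = (g.headD []).length := by
  cases g <;> simp [colsOf, PySem.List.pyGetD_zero]

lemma main_eq (g : List (List String)) (s : Int) (hpre : Pre_checkFourInRow g s) :
    checkFourInRow g s = checkFourInRow_alt g s := by
  rw [A_eq, B_eq]
  rcases hpre with hC0 | ⟨hCm, _⟩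
  · have hc0 : colsOf g = 0 := by rw [colsOf_headD]; exact hC0
    have hctrg : checkToRemoveA g = [] := by rw [ctr_eq, hc0]; simp [blockA]
    have hcinv : checkToRemoveA (inverseMapA g) = [] := by
      rcases Nat.eq_zero_or_pos g.length with h0 | hN
      · have hgnil : g = [] := List.length_eq_zero_iff.mp h0
        subst hgnil
        rfl
      · rw [ctr_eq, cols_inverse g hN, hc0]; simp [blockA]
    have hTR : TRlist g = [] := by unfold TRlist; rw [hctrg, hcinv]; rfl
    have hcl : clearedD g = [] := by unfold clearedD; rw [hc0]; simp
    rw [hTR, hcl]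
    simp
  · have hCN : colsOf g = g.length := by rw [colsOf_headD]; exact hCm
    have hmemT := mem_TRlist g hCN
    have hndM : ((TRlist g).map toPair).Nodup := by
      refine List.Nodup.map_on ?_ (nodup_TRlist g)
      intro x hx y hy hxy
      obtain ⟨rx, _, cx, _, rfl, _⟩ := (hmemT x).mp hx
      obtain ⟨ry, _, cy, _, rfl, _⟩ := (hmemT y).mp hy
      rw [toPair_pair, toPair_pair] at hxy
      simp only [Prod.mk.injEq] at hxy
      rw [hxy.1, hxy.2]
    have hmemiff : ∀ p, p ∈ (TRlist g).map toPair ↔ p ∈ clearedD g := by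
      intro p
      rw [List.mem_map, mem_clearedD]
      constructor
      · rintro ⟨x, hx, rfl⟩
        obtain ⟨rx, hrx, cx, hcx, rfl, hmark⟩ := (hmemT x).mp hx
        rw [toPair_pair]
        refine ⟨rx, hrx, cx, by omega, rfl, ?_⟩
        rw [PB_iff, hCN]
        exact hmark
      · rintro ⟨rn, hrn, cn, hcn, rfl, hPB⟩
        rw [PB_iff, hCN] at hPB
        exact ⟨[(rn : Int), (cn : Int)], (hmemT _).mpr ⟨rn, hrn, cn, by omega, rfl, hPB⟩,
          toPair_pair _ _⟩
    have hperm : ((TRlist g).map toPair).Perm (clearedD g) :=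
      (List.perm_ext_iff_of_nodup hndM (nodup_clearedD g)).mpr hmemiff
    have hpos : ∀ p ∈ (TRlist g).map toPair, 0 ≤ p.1 ∧ 0 ≤ p.2 := by
      intro p hp
      rw [List.mem_map] at hp
      obtain ⟨x, hx, rfl⟩ := hp
      obtain ⟨rx, _, cx, _, rfl, _⟩ := (hmemT x).mp hx
      rw [toPair_pair]
      exact ⟨Int.natCast_nonneg _, Int.natCast_nonneg _⟩
    have hgrid := markfold_perm _ _ hperm hpos g
    have hlen : (TRlist g).length = (clearedD g).length := by
      have := hperm.length_eq
      simpa using this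
    rw [hgrid, hlen]

-- ===== VERDICT (by name: the statement is the Claim_ definition above) =====
theorem checkFourInRow_spec : Claim_equal_checkFourInRow := by
  intro g s _ hpre
  unfold Spec_checkFourInRow
  exact main_eq g s hpre
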